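-- pv_equiv track=rewrite | github.com/saint0x/agent-test | agents/static_agent.py | should_analyze_file
-- ===== SOURCE A (Python) =====
-- import fnmatch
--
-- def should_analyze_file(file_path):
--     """
--     Determine if a file should be analyzed based on its extension and name.
--     """
--     patterns_to_analyze = [
--         '*.py', '*.js', '*.ts', '*.php', '*.rb', '*.java', '*.go', '*.cs',  # Backend code
--         '*.html', '*.css', '*.scss', '*.jsx', '*.tsx',  # Frontend code
--         '*.sql',  # Database scripts
--         'Dockerfile', 'docker-compose.yml',  # Docker files
--         '*.xml', '*.json', '*.yaml', '*.yml',  # Configuration files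
--         '*.c', '*.cpp', '*.h', '*.hpp',  # C/C++ files
--         '*.rs',  # Rust files
--         '*.scala',  # Scala files
--         '*.kt',  # Kotlin files
--         '*.swift',  # Swift files
--         '*.sh', '*.bash',  # Shell scripts
--         '*.ps1',  # PowerShell scripts
--         '*.vue',  # Vue.js files
--         '*.dart'  # Dart files
--     ]
--
--     return any(fnmatch.fnmatch(file_path, pattern) for pattern in patterns_to_analyze)
-- ===== SOURCE B (Python) =====
-- _SUFFIXES = ('.py', '.js', '.ts', '.php', '.rb', '.java', '.go', '.cs',
--              '.html', '.css', '.scss', '.jsx', '.tsx',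
--              '.sql', '.xml', '.json', '.yaml', '.yml',
--              '.c', '.cpp', '.h', '.hpp', '.rs', '.scala', '.kt', '.swift',
--              '.sh', '.bash', '.ps1', '.vue', '.dart')
--
-- _LITERAL_NAMES = frozenset({'Dockerfile', 'docker-compose.yml'})
--
--
-- def should_analyze_file(file_path):
--     """
--     Determine if a file should be analyzed based on its extension and name.
--     """
--     return file_path.endswith(_SUFFIXES) or file_path in _LITERAL_NAMES
-- ===== Notes on version B (the rewrite author's own statement) =====
-- stated objective: simpler
-- what changed: Replaces the any() loop of per-pattern fnmatch glob matches with a single str.endswith over a tuple of stripped extension suffixes plus one frozenset membership test for the two literal file names.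
import Mathlib
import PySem

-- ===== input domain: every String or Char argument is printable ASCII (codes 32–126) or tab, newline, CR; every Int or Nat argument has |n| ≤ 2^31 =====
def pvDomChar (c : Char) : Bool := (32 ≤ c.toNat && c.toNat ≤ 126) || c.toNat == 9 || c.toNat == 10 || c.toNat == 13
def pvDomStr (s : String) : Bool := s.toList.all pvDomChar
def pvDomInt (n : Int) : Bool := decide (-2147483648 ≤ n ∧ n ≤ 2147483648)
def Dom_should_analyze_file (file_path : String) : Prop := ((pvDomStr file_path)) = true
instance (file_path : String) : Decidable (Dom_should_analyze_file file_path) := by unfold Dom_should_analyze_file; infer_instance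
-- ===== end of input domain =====

-- B replaces A's per-pattern fnmatch any() loop by one endswith-over-suffixes test
-- plus a literal-name membership test (objective: simpler).

-- ===== PORT A =====
-- hand port of fnmatch.fnmatch for patterns built from literal chars, '*' and '?'
-- (exact for such patterns on the ASCII domain; the 37 patterns below use only '*' and literals)
def pvGlob : List Char → List Char → Bool
  | [], s => s.isEmpty
  | c :: p, s =>
    if c = '*' then
      pvGlob p s ||
        (match s with
         | [] => false
         | _ :: s' => pvGlob (c :: p) s')
    else
      match s with
      | [] => false
      | x :: s' => (c == x || c == '?') && pvGlob p s'
termination_by p s => p.length + s.length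

def pvFnmatch (file_path pattern : String) : Bool :=
  pvGlob pattern.toList file_path.toList

def pvPatternsToAnalyze : List String :=
  ["*.py", "*.js", "*.ts", "*.php", "*.rb", "*.java", "*.go", "*.cs",
   "*.html", "*.css", "*.scss", "*.jsx", "*.tsx",
   "*.sql",
   "Dockerfile", "docker-compose.yml",
   "*.xml", "*.json", "*.yaml", "*.yml",
   "*.c", "*.cpp", "*.h", "*.hpp",
   "*.rs", "*.scala", "*.kt", "*.swift",
   "*.sh", "*.bash", "*.ps1", "*.vue", "*.dart"]

def should_analyze_file (file_path : String) : Bool :=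
  pvPatternsToAnalyze.any (fun pattern => pvFnmatch file_path pattern)

-- ===== PORT B =====
def pvSuffixes : List String :=
  [".py", ".js", ".ts", ".php", ".rb", ".java", ".go", ".cs",
   ".html", ".css", ".scss", ".jsx", ".tsx",
   ".sql", ".xml", ".json", ".yaml", ".yml",
   ".c", ".cpp", ".h", ".hpp", ".rs", ".scala", ".kt", ".swift",
   ".sh", ".bash", ".ps1", ".vue", ".dart"]

def pvLiteralNames : PySem.Set String := PySem.Set.ofList ["Dockerfile", "docker-compose.yml"]

def should_analyze_file_alt (file_path : String) : Bool :=
  -- str.endswith(tuple) is true iff it ends with some member of the tuple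
  pvSuffixes.any (fun suf => PySem.Str.endswith file_path suf) ||
    pvLiteralNames.contains file_path

-- ===== PRECONDITION & SPEC =====
def Spec_should_analyze_file (file_path : String) (out : Bool) : Prop := out = should_analyze_file_alt file_path
instance (file_path : String) (out : Bool) : Decidable (Spec_should_analyze_file file_path out) := by unfold Spec_should_analyze_file; infer_instance

-- ===== CLAIM (what is proved, stated in full; the proofs are below) =====
def Claim_equal_should_analyze_file : Prop := ∀ (file_path : String), Dom_should_analyze_file file_path → Spec_should_analyze_file file_path (should_analyze_file file_path)

-- ===== LEMMAS AND PROOFS =====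

def pvNoWild (p : List Char) : Bool := p.all (fun c => !(c == '*' || c == '?'))

theorem pvGlob_lit (p : List Char) (h : pvNoWild p = true) (s : List Char) :
    pvGlob p s = (s == p) := by
  induction p generalizing s with
  | nil => cases s <;> simp [pvGlob]
  | cons c p ih =>
    simp only [pvNoWild, List.all_cons, Bool.and_eq_true] at h
    have hc : ¬ c = '*' := by
      intro hc; subst hc; simp at h
    cases s with
    | nil => simp [pvGlob, hc]
    | cons x s' =>
      have : pvGlob p s' = (s' == p) := ih (by simpa [pvNoWild] using h.2) s'
      have hq : (c == '?') = false := by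
        rcases h with ⟨h1, _⟩; cases hcq : c == '?' <;> simp_all
      simp [pvGlob, hc, this, hq, BEq.comm (a := x)]

theorem pvGlob_star (p : List Char) (h : pvNoWild p = true) (s : List Char) :
    pvGlob ('*' :: p) s = PySem.Chars.endswith s p := by
  induction s with
  | nil =>
    have := pvGlob_lit p h []
    simp only [pvGlob, this]
    rcases hp : p with _ | ⟨c, q⟩
    · simp [PySem.Chars.endswith]
    · have : PySem.Chars.endswith [] (c :: q) = false := by
        rcases hcw : PySem.Chars.endswith [] (c :: q)
        · rfl
        · exact absurd (List.eq_nil_of_suffix_nil ((PySem.Chars.endswith_iff _ _).mp hcw)) (by simp)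
      simp [this]
  | cons x s' ih =>
    have hlit := pvGlob_lit p h (x :: s')
    have hrec : pvGlob ('*' :: p) s' = PySem.Chars.endswith s' p := ih
    have hchar : PySem.Chars.endswith (x :: s') p
        = ((x :: s' == p) || PySem.Chars.endswith s' p) := by
      rcases hb : ((x :: s' == p) || PySem.Chars.endswith s' p) with _ | _
      · simp only [Bool.or_eq_false_iff] at hb
        rcases hcw : PySem.Chars.endswith (x :: s') p
        · rfl
        · have := (PySem.Chars.endswith_iff _ _).mp hcw
          rcases List.suffix_cons_iff.mp this with h1 | h2
          · exact absurd (beq_iff_eq.mpr h1.symm) (by simp [hb.1])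
          · exact absurd ((PySem.Chars.endswith_iff _ _).mpr h2) (by simp [hb.2])
      · apply (PySem.Chars.endswith_iff _ _).mpr
        simp only [Bool.or_eq_true] at hb
        rcases hb with h1 | h2
        · exact (beq_iff_eq.mp h1) ▸ List.suffix_refl _
        · exact ((PySem.Chars.endswith_iff _ _).mp h2).trans (List.suffix_cons _ _)
    simp only [pvGlob]
    simp [hlit, hrec, hchar]

theorem pvBeq_toList (s t : String) : (s == t) = (s.toList == t.toList) := by
  rcases hb : s.toList == t.toList
  · simp only [beq_eq_false_iff_ne] at hb
    simp only [beq_eq_false_iff_ne]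
    intro he; exact hb (by rw [he])
  · simp only [beq_iff_eq] at hb ⊢
    exact String.ext (by simpa [String.toList] using hb)

-- ===== VERDICT (by name: the statement is the Claim_ definition above) =====
def pvS1 : List String :=
  [".py", ".js", ".ts", ".php", ".rb", ".java", ".go", ".cs",
   ".html", ".css", ".scss", ".jsx", ".tsx", ".sql"]

def pvS2 : List String :=
  [".xml", ".json", ".yaml", ".yml",
   ".c", ".cpp", ".h", ".hpp", ".rs", ".scala", ".kt", ".swift",
   ".sh", ".bash", ".ps1", ".vue", ".dart"]

theorem pv_any_star (sufs : List String)
    (h : sufs.all (fun suf => pvNoWild suf.toList) = true) (s : List Char) :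
    (sufs.map (fun suf => "*" ++ suf)).any (fun pat => pvGlob pat.toList s)
      = sufs.any (fun suf => PySem.Chars.endswith s suf.toList) := by
  induction sufs with
  | nil => rfl
  | cons a l ih =>
    simp only [List.all_cons, Bool.and_eq_true] at h
    have hal : ("*" ++ a).toList = '*' :: a.toList := by
      rw [String.toList_append]; rfl
    simp only [List.map_cons, List.any_cons, hal, pvGlob_star a.toList h.1 s, ih h.2]

theorem should_analyze_file_spec : Claim_equal_should_analyze_file := by
  intro s _
  unfold Spec_should_analyze_file should_analyze_file should_analyze_file_alt
  have hpat : pvPatternsToAnalyze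
      = (pvS1.map (fun suf => "*" ++ suf)) ++ ["Dockerfile", "docker-compose.yml"]
          ++ (pvS2.map (fun suf => "*" ++ suf)) := by decide
  have hsuf : pvSuffixes = pvS1 ++ pvS2 := by decide
  have hlit : pvLiteralNames = ["Dockerfile", "docker-compose.yml"] := by decide
  rw [hpat, hsuf, hlit]
  simp only [List.any_append, pv_any_star pvS1 (by decide) s.toList,
    pv_any_star pvS2 (by decide) s.toList, List.any_cons, List.any_nil,
    Bool.or_false, pvFnmatch,
    pvGlob_lit ("Dockerfile".toList) (by decide),
    pvGlob_lit ("docker-compose.yml".toList) (by decide),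
    PySem.Str.endswith_eq, PySem.Set.contains, List.contains_cons, List.contains_nil,
    pvBeq_toList]
  cases (pvS1.any (fun suf => PySem.Chars.endswith s.toList suf.toList)) <;>
    cases (pvS2.any (fun suf => PySem.Chars.endswith s.toList suf.toList)) <;>
      cases (s.toList == "Dockerfile".toList) <;> simp
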